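-- pv_equiv track=rewrite | github.com/feidon/vss | backend/application/schedule/schedule_service.py | _min_positive_outside
-- ===== SOURCE A (Python) =====
-- def _min_positive_outside(intervals: list[tuple[int, int]]) -> int:
--     """Smallest positive integer not covered by any interval."""
--     positive_intervals = [(max(lo, 1), hi) for lo, hi in intervals if hi >= 1]
--     if not positive_intervals:
--         return 1
--     positive_intervals.sort()
--     merged = [list(positive_intervals[0])]
--     for lo, hi in positive_intervals[1:]:
--         if lo <= merged[-1][1] + 1:
--             merged[-1][1] = max(merged[-1][1], hi)
--         else:
--             merged.append([lo, hi])
--     if merged[0][0] > 1: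
--         return 1
--     return merged[0][1] + 1
-- ===== SOURCE B (Python) =====
-- def _min_positive_outside(intervals: list[tuple[int, int]]) -> int:
--     """Smallest positive integer not covered by any interval.
--
--     Frontier scan: keep a candidate ans, repeatedly sweep the (unsorted)
--     intervals and jump ans past any interval that covers it; a sweep with
--     no change means ans is uncovered.  At most len(intervals) sweeps can
--     make progress, so len(intervals) + 1 sweeps always suffice.
--     """
--     ans = 1
--     for _ in range(len(intervals) + 1):
--         prev = ans
--         for lo, hi in intervals:
--             if lo <= ans <= hi:
--                 ans = hi + 1
--         if ans == prev:
--             return ans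
--     return ans
-- ===== Notes on version B (the rewrite author's own statement) =====
-- stated objective: alternative
-- what changed: Replaced sort-then-merge (clamp positives, sort, coalesce adjacent intervals, read off first gap) with a sort-free frontier scan: repeatedly sweep the unsorted intervals, jumping the candidate past any interval covering it, until a sweep makes no change.
import Mathlib
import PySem

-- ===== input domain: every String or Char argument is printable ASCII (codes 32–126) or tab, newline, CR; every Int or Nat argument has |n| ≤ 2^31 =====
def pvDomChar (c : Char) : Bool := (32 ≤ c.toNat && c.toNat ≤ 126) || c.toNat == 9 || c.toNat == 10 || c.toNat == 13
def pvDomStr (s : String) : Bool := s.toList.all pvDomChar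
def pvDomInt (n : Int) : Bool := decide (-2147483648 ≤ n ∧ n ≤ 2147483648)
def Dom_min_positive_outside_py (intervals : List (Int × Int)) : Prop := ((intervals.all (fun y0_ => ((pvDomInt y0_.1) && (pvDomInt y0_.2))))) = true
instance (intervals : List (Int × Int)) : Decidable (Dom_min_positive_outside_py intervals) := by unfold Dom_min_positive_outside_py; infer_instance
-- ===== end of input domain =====

-- B replaces A's sort-then-merge by a sort-free frontier scan that re-sweeps the
-- unsorted intervals until a sweep leaves the candidate unchanged (alternative
-- decomposition, not claimed faster).

-- ===== PORT A =====
-- merge loop body; the merged list is kept REVERSED (head = Python's merged[-1],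
-- getLastD = Python's merged[0]).
def pvMergeStep (acc : List (Int × Int)) (p : Int × Int) : List (Int × Int) :=
  match acc with
  | [] => [p]                                   -- unreachable: acc starts nonempty
  | (l, h) :: rest =>
      if p.1 ≤ h + 1 then (l, max h p.2) :: rest else p :: (l, h) :: rest

def min_positive_outside_py (intervals : List (Int × Int)) : Int :=
  let positive := (intervals.filter (fun p => 1 ≤ p.2)).map (fun p => (max p.1 1, p.2))
  -- 'if not positive_intervals: return 1' — sorted2 is [] iff positive is []
  match PySem.List.sorted2 positive (fun p => p.1) (fun p => p.2) with
  | [] => 1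
  | x :: rest =>
      let mergedRev := rest.foldl pvMergeStep [x]
      let first := mergedRev.getLastD (0, 0)    -- merged[0]
      if 1 < first.1 then 1 else first.2 + 1

-- ===== PORT B =====
-- one sweep over the intervals, jumping ans past any interval covering it
def pvPass (intervals : List (Int × Int)) (a : Int) : Int :=
  intervals.foldl (fun ans p => if p.1 ≤ ans ∧ ans ≤ p.2 then p.2 + 1 else ans) a

-- 'for _ in range(len(intervals)+1): … if ans == prev: return ans'
def pvLoop (intervals : List (Int × Int)) : Nat → Int → Int
  | 0, ans => ans
  | k + 1, ans =>
      let ans' := pvPass intervals ans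
      if ans' = ans then ans' else pvLoop intervals k ans'

def min_positive_outside_py_alt (intervals : List (Int × Int)) : Int :=
  pvLoop intervals (intervals.length + 1) 1

-- ===== PRECONDITION & SPEC =====
def Spec_min_positive_outside_py (intervals : List (Int × Int)) (out : Int) : Prop := out = min_positive_outside_py_alt intervals
instance (intervals : List (Int × Int)) (out : Int) : Decidable (Spec_min_positive_outside_py intervals out) := by unfold Spec_min_positive_outside_py; infer_instance

-- ===== CLAIM (what is proved, stated in full; the proofs are below) =====
def Claim_equal_min_positive_outside_py : Prop := ∀ (intervals : List (Int × Int)), Dom_min_positive_outside_py intervals → Spec_min_positive_outside_py intervals (min_positive_outside_py intervals)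

-- ===== LEMMAS AND PROOFS =====

-- m is covered by some interval of xs
def pvCov (xs : List (Int × Int)) (m : Int) : Prop := ∃ p ∈ xs, p.1 ≤ m ∧ m ≤ p.2

-- r is THE smallest positive integer not covered by xs
def pvGood (xs : List (Int × Int)) (r : Int) : Prop :=
  1 ≤ r ∧ (∀ m, 1 ≤ m → m < r → pvCov xs m) ∧ ¬ pvCov xs r

theorem pvGood_unique {xs : List (Int × Int)} {r r' : Int}
    (h : pvGood xs r) (h' : pvGood xs r') : r = r' := by
  obtain ⟨h1, h2, h3⟩ := h
  obtain ⟨h1', h2', h3'⟩ := h'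
  by_contra hne
  rcases lt_trichotomy r r' with hlt | heq | hgt
  · exact h3 (h2' r h1 hlt)
  · exact hne heq
  · exact h3' (h2 r' h1' hgt)

theorem pvPass_ge (xs : List (Int × Int)) : ∀ a : Int, a ≤ pvPass xs a := by
  induction xs with
  | nil => intro a; simp [pvPass]
  | cons p t ih =>
      intro a
      simp only [pvPass, List.foldl_cons]
      by_cases h : p.1 ≤ a ∧ a ≤ p.2
      · simp only [if_pos h]
        exact le_trans (by omega) (ih (p.2 + 1))
      · simp only [if_neg h]; exact ih a

theorem pvPass_cov (xs : List (Int × Int)) :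
    ∀ a m : Int, a ≤ m → m < pvPass xs a → pvCov xs m := by
  induction xs with
  | nil => intro a m h1 h2; simp [pvPass] at h2; omega
  | cons p t ih =>
      intro a m h1 h2
      simp only [pvPass, List.foldl_cons] at h2
      by_cases h : p.1 ≤ a ∧ a ≤ p.2
      · simp only [if_pos h] at h2
        by_cases hm : m ≤ p.2
        · exact ⟨p, List.mem_cons_self, by omega, hm⟩
        · obtain ⟨q, hq, hc⟩ := ih (p.2 + 1) m (by omega) h2
          exact ⟨q, List.mem_cons_of_mem _ hq, hc⟩
      · simp only [if_neg h] at h2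
        obtain ⟨q, hq, hc⟩ := ih a m h1 h2
        exact ⟨q, List.mem_cons_of_mem _ hq, hc⟩

theorem pvPass_fix (xs : List (Int × Int)) :
    ∀ a : Int, pvPass xs a = a → ¬ pvCov xs a := by
  induction xs with
  | nil => intro a _ hc; obtain ⟨q, hq, _⟩ := hc; simp at hq
  | cons p t ih =>
      intro a hfix hc
      simp only [pvPass, List.foldl_cons] at hfix
      by_cases h : p.1 ≤ a ∧ a ≤ p.2
      · simp only [if_pos h] at hfix
        have := pvPass_ge t (p.2 + 1)
        simp only [pvPass] at this
        omega
      · simp only [if_neg h] at hfix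
        obtain ⟨q, hq, hc1, hc2⟩ := hc
        rcases List.mem_cons.mp hq with rfl | hq'
        · exact h ⟨hc1, hc2⟩
        · exact ih a hfix ⟨q, hq', hc1, hc2⟩

theorem pvPass_change (xs : List (Int × Int)) :
    ∀ a : Int, pvPass xs a ≠ a → ∃ p ∈ xs, pvPass xs a = p.2 + 1 ∧ a ≤ p.2 := by
  induction xs with
  | nil => intro a h; simp [pvPass] at h
  | cons p t ih =>
      intro a h
      simp only [pvPass, List.foldl_cons] at h ⊢
      by_cases hg : p.1 ≤ a ∧ a ≤ p.2
      · simp only [if_pos hg] at h ⊢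
        by_cases hfix : pvPass t (p.2 + 1) = p.2 + 1
        · exact ⟨p, List.mem_cons_self, by simpa [pvPass] using hfix, hg.2⟩
        · obtain ⟨q, hq, h1, h2⟩ := ih (p.2 + 1) hfix
          exact ⟨q, List.mem_cons_of_mem _ hq, h1, by omega⟩
      · simp only [if_neg hg] at h ⊢
        obtain ⟨q, hq, h1, h2⟩ := ih a h
        exact ⟨q, List.mem_cons_of_mem _ hq, h1, h2⟩

-- number of intervals whose upper end is still ahead of the frontier
def pvCnt (xs : List (Int × Int)) (a : Int) : Nat :=
  (xs.filter (fun q => decide (a ≤ q.2))).length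

theorem pvCnt_mono (xs : List (Int × Int)) {a a' : Int} (h : a ≤ a') :
    pvCnt xs a' ≤ pvCnt xs a := by
  induction xs with
  | nil => simp [pvCnt]
  | cons q t ih =>
      simp only [pvCnt, List.filter_cons] at ih ⊢
      by_cases h1 : a' ≤ q.2
      · have h2 : a ≤ q.2 := le_trans h h1
        simp [h1, h2]; omega
      · by_cases h2 : a ≤ q.2 <;> simp [h1, h2] <;> omega

theorem pvCnt_strict (xs : List (Int × Int)) {p : Int × Int} {a a' : Int}
    (hp : p ∈ xs) (h1 : a ≤ p.2) (h2 : p.2 < a') : pvCnt xs a' < pvCnt xs a := by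
  induction xs with
  | nil => simp at hp
  | cons q t ih =>
      rcases List.mem_cons.mp hp with rfl | hq
      · have hlt : ¬ (a' ≤ p.2) := by omega
        have := pvCnt_mono t (a := a) (a' := a') (by omega)
        simp only [pvCnt] at this ⊢
        simp [h1, hlt]
        omega
      · have ht := ih hq
        simp only [pvCnt, List.filter_cons] at ht ⊢
        by_cases hb : a' ≤ q.2
        · have hb' : a ≤ q.2 := by omega
          simp [hb, hb']; omega
        · by_cases hb' : a ≤ q.2 <;> simp [hb, hb'] <;> omega

theorem pvLoop_fix (xs : List (Int × Int)) :
    ∀ (k : Nat) (a : Int), pvCnt xs a ≤ k →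
      pvPass xs (pvLoop xs (k + 1) a) = pvLoop xs (k + 1) a := by
  intro k
  induction k with
  | zero =>
      intro a hc
      by_cases hfix : pvPass xs a = a
      · simp [pvLoop, hfix]
      · obtain ⟨p, hp, _, h2⟩ := pvPass_change xs a hfix
        have hmem : p ∈ xs.filter (fun q => decide (a ≤ q.2)) :=
          List.mem_filter.mpr ⟨hp, by simp [h2]⟩
        have : 0 < pvCnt xs a := by
          have := List.length_pos_of_mem hmem
          simpa [pvCnt] using this
        omega
  | succ k ih =>
      intro a hc
      by_cases hfix : pvPass xs a = a
      · simp [pvLoop, hfix]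
      · obtain ⟨p, hp, h1, h2⟩ := pvPass_change xs a hfix
        have hdec : pvCnt xs (pvPass xs a) < pvCnt xs a :=
          pvCnt_strict xs hp h2 (by omega)
        have := ih (pvPass xs a) (by omega)
        simp only [pvLoop, hfix]
        exact this

theorem pvLoop_ge (xs : List (Int × Int)) :
    ∀ (k : Nat) (a : Int), a ≤ pvLoop xs k a := by
  intro k
  induction k with
  | zero => intro a; simp [pvLoop]
  | succ k ih =>
      intro a
      simp only [pvLoop]
      by_cases hfix : pvPass xs a = a
      · simp [hfix]
      · simp only [if_neg hfix]
        exact le_trans (pvPass_ge xs a) (ih (pvPass xs a))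

theorem pvLoop_cov (xs : List (Int × Int)) :
    ∀ (k : Nat) (a m : Int), a ≤ m → m < pvLoop xs k a → pvCov xs m := by
  intro k
  induction k with
  | zero => intro a m h1 h2; simp [pvLoop] at h2; omega
  | succ k ih =>
      intro a m h1 h2
      simp only [pvLoop] at h2
      by_cases hfix : pvPass xs a = a
      · simp [hfix] at h2; omega
      · simp only [if_neg hfix] at h2
        by_cases hm : m < pvPass xs a
        · exact pvPass_cov xs a m h1 hm
        · exact ih (pvPass xs a) m (by omega) h2

theorem pvB_good (xs : List (Int × Int)) : pvGood xs (min_positive_outside_py_alt xs) := by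
  have hcnt : pvCnt xs 1 ≤ xs.length := by
    simpa [pvCnt] using List.length_filter_le (fun q : Int × Int => decide ((1:Int) ≤ q.2)) xs
  have hfix := pvLoop_fix xs xs.length 1 hcnt
  refine ⟨pvLoop_ge xs (xs.length + 1) 1, ?_, ?_⟩
  · intro m h1 h2
    exact pvLoop_cov xs (xs.length + 1) 1 m h1 h2
  · exact pvPass_fix xs _ hfix

-- ===== A-side lemmas =====

-- sorted2's comparator keeps first components nondecreasing
theorem pvInsertBy_pairwise_fst (x : Int × Int) (ys : List (Int × Int))
    (h : ys.Pairwise (fun a b : Int × Int => a.1 ≤ b.1)) :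
    (PySem.List.insertBy
        (fun a b : Int × Int => decide (a.1 < b.1) || (!decide (b.1 < a.1) && decide (a.2 < b.2)))
        x ys).Pairwise (fun a b : Int × Int => a.1 ≤ b.1) := by
  induction ys with
  | nil => simp [PySem.List.insertBy]
  | cons y t ih =>
      simp only [PySem.List.insertBy]
      by_cases hb : (decide (x.1 < y.1) || (!decide (y.1 < x.1) && decide (x.2 < y.2))) = true
      · simp only [hb, if_true]
        have hx : x.1 ≤ y.1 := by
          rcases Bool.or_eq_true_iff.mp hb with h' | h'
        -- ok
          · exact le_of_lt (of_decide_eq_true h')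
          · have := (Bool.and_eq_true_iff.mp h').1
            simp only [Bool.not_eq_eq_eq_not, Bool.not_true, decide_eq_false_iff_not, not_lt] at this
            exact this
        constructor
        · intro b hbmem
          rcases List.mem_cons.mp hbmem with rfl | hbt
          · exact hx
          · exact le_trans hx ((List.pairwise_cons.mp h).1 b hbt)
        · exact h
      · simp only [hb]
        have hy : y.1 ≤ x.1 := by
          simp only [Bool.or_eq_true_iff, Bool.and_eq_true_iff, decide_eq_true_eq, not_or,
            Bool.not_eq_eq_eq_not, Bool.not_true, decide_eq_false_iff_not] at hb
          omega
        obtain ⟨hhead, htail⟩ := List.pairwise_cons.mp h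
        constructor
        · intro b hbmem
          rcases (PySem.List.insertBy_mem_iff _ _ _ _).mp hbmem with rfl | hbt
          · exact hy
          · exact hhead b hbt
        · exact ih htail

theorem pvSorted2_pairwise_fst (xs : List (Int × Int)) :
    (PySem.List.sorted2 xs (fun p => p.1) (fun p => p.2)).Pairwise
      (fun a b : Int × Int => a.1 ≤ b.1) := by
  show (List.foldl _ [] xs).Pairwise _
  have : ∀ (l acc : List (Int × Int)), acc.Pairwise (fun a b : Int × Int => a.1 ≤ b.1) →
      (l.foldl (fun acc x => PySem.List.insertBy
        (fun a b : Int × Int => decide (a.1 < b.1) || (!decide (b.1 < a.1) && decide (a.2 < b.2)))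
        x acc) acc).Pairwise (fun a b : Int × Int => a.1 ≤ b.1) := by
    intro l
    induction l with
    | nil => intro acc h; simpa using h
    | cons x t ih =>
        intro acc h
        exact ih _ (pvInsertBy_pairwise_fst x acc h)
  exact this xs [] (by simp)

theorem pvGetLastD_irrel {t : List (Int × Int)} (h : t ≠ []) (d d' : Int × Int) :
    t.getLastD d = t.getLastD d' := by
  simp [List.getLastD_eq_getLast?, List.getLast?_eq_some_getLast h]

-- the merge-fold invariant: first components of merged[0] never change, every
-- integer in merged[0] is covered by a processed interval, and no processed
-- interval reaches past merged[0][1]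
theorem pvMerge_inv :
    ∀ (rest : List (Int × Int)) (l h : Int) (tacc done : List (Int × Int)),
      rest.Pairwise (fun p q : Int × Int => p.1 ≤ q.1) →
      (∀ p ∈ rest, l ≤ p.1) →
      (∀ m : Int, (tacc.getLastD (l, h)).1 ≤ m → m ≤ (tacc.getLastD (l, h)).2 → pvCov done m) →
      (∀ p ∈ done, p.1 ≤ (tacc.getLastD (l, h)).2 + 1 → p.2 ≤ (tacc.getLastD (l, h)).2) →
      (tacc = [] → ∀ p ∈ done, p.2 ≤ h) →
      (tacc ≠ [] → (tacc.getLastD (l, h)).2 + 1 < l) →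
      ((rest.foldl pvMergeStep ((l, h) :: tacc)).getLastD (0, 0)).1 = (tacc.getLastD (l, h)).1 ∧
      (tacc.getLastD (l, h)).2 ≤ ((rest.foldl pvMergeStep ((l, h) :: tacc)).getLastD (0, 0)).2 ∧
      (∀ m : Int, ((rest.foldl pvMergeStep ((l, h) :: tacc)).getLastD (0, 0)).1 ≤ m →
        m ≤ ((rest.foldl pvMergeStep ((l, h) :: tacc)).getLastD (0, 0)).2 → pvCov (done ++ rest) m) ∧
      (∀ p ∈ done ++ rest, p.1 ≤ ((rest.foldl pvMergeStep ((l, h) :: tacc)).getLastD (0, 0)).2 + 1 →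
        p.2 ≤ ((rest.foldl pvMergeStep ((l, h) :: tacc)).getLastD (0, 0)).2) := by
  intro rest
  induction rest with
  | nil =>
      intro l h tacc done _ _ H2 H3 _ _
      simp only [List.foldl_nil, List.getLastD_cons, List.append_nil]
      exact ⟨by trivial, le_refl _, H2, H3⟩
  | cons p rest' ih =>
      intro l h tacc done hpw hsort H2 H3 H4 H5
      have hp_lo : l ≤ p.1 := hsort p List.mem_cons_self
      obtain ⟨hpw_head, hpw_tail⟩ := List.pairwise_cons.mp hpw
      have hsort' : ∀ q ∈ rest', l ≤ q.1 := fun q hq => hsort q (List.mem_cons_of_mem _ hq)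
      simp only [List.foldl_cons]
      by_cases habs : p.1 ≤ h + 1
      · -- absorption: merged[-1] becomes (l, max h p.2)
        have hstep : pvMergeStep ((l, h) :: tacc) p = (l, max h p.2) :: tacc := by
          simp [pvMergeStep, habs]
        rw [hstep]
        have hGG' : tacc ≠ [] → tacc.getLastD (l, max h p.2) = tacc.getLastD (l, h) :=
          fun hne => pvGetLastD_irrel hne _ _
        have key := ih l (max h p.2) tacc (done ++ [p]) hpw_tail hsort'
          (by -- H2'
            intro m hm1 hm2
            rcases eq_or_ne tacc [] with rfl | hne
            · simp only [List.getLastD_nil] at hm1 hm2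
              by_cases hmh : m ≤ h
              · obtain ⟨q, hq, hc⟩ := H2 m (by simpa using hm1) (by simpa using hmh)
                exact ⟨q, List.mem_append_left _ hq, hc⟩
              · exact ⟨p, List.mem_append_right _ List.mem_cons_self, by omega,
                  by simp at hm2; omega⟩
            · rw [hGG' hne] at hm1 hm2
              obtain ⟨q, hq, hc⟩ := H2 m hm1 hm2
              exact ⟨q, List.mem_append_left _ hq, hc⟩)
          (by -- H3'
            intro q hq hle
            rcases eq_or_ne tacc [] with rfl | hne
            · simp only [List.getLastD_nil] at hle ⊢
              rcases List.mem_append.mp hq with hqd | hqp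
              · have := H4 rfl q hqd; omega
              · simp only [List.mem_singleton] at hqp; subst hqp; omega
            · rw [hGG' hne] at hle ⊢
              rcases List.mem_append.mp hq with hqd | hqp
              · exact H3 q hqd hle
              · simp only [List.mem_singleton] at hqp; subst hqp
                have := H5 hne; omega)
          (by -- H4'
            intro htn q hq
            rcases List.mem_append.mp hq with hqd | hqp
            · have := H4 htn q hqd; omega
            · simp only [List.mem_singleton] at hqp; subst hqp; omega)
          (by -- H5'
            intro hne; rw [hGG' hne]; exact H5 hne)
        rcases eq_or_ne tacc [] with rfl | hne
        · simp only [List.getLastD_nil] at key ⊢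
          refine ⟨key.1, by have := key.2.1; simp at this ⊢; omega, ?_, ?_⟩
          · intro m hm1 hm2
            have := key.2.2.1 m hm1 hm2
            simpa [List.append_assoc] using this
          · intro q hq hle
            exact key.2.2.2 q (by simpa [List.append_assoc] using hq) hle
        · rw [hGG' hne] at key
          refine ⟨key.1, key.2.1, ?_, ?_⟩
          · intro m hm1 hm2
            have := key.2.2.1 m hm1 hm2
            simpa [List.append_assoc] using this
          · intro q hq hle
            exact key.2.2.2 q (by simpa [List.append_assoc] using hq) hle
      · -- append: p starts a new merged interval
        have hstep : pvMergeStep ((l, h) :: tacc) p = p :: (l, h) :: tacc := by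
          simp [pvMergeStep, habs]
        rw [hstep]
        have hG : ((l, h) :: tacc).getLastD (p.1, p.2) = tacc.getLastD (l, h) :=
          List.getLastD_cons ..
        have hkey : (tacc.getLastD (l, h)).2 + 1 < p.1 := by
          rcases eq_or_ne tacc [] with rfl | hne
          · simp only [List.getLastD_nil]; omega
          · have := H5 hne; omega
        have key := ih p.1 p.2 ((l, h) :: tacc) (done ++ [p]) hpw_tail hpw_head
          (by -- H2''
            intro m hm1 hm2
            rw [hG] at hm1 hm2
            obtain ⟨q, hq, hc⟩ := H2 m hm1 hm2
            exact ⟨q, List.mem_append_left _ hq, hc⟩)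
          (by -- H3''
            intro q hq hle
            rw [hG] at hle ⊢
            rcases List.mem_append.mp hq with hqd | hqp
            · exact H3 q hqd hle
            · simp only [List.mem_singleton] at hqp; subst hqp; omega)
          (by intro habs'; exact absurd habs' (List.cons_ne_nil _ _))
          (by intro _; rw [hG]; exact hkey)
        rw [hG] at key
        refine ⟨key.1, key.2.1, ?_, ?_⟩
        · intro m hm1 hm2
          have := key.2.2.1 m hm1 hm2
          simpa [List.append_assoc] using this
        · intro q hq hle
          exact key.2.2.2 q (by simpa [List.append_assoc] using hq) hle

-- for positive m, coverage by the clamped positive list is coverage by xs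
theorem pvCov_pos_iff (xs : List (Int × Int)) (m : Int) (hm : 1 ≤ m) :
    pvCov ((xs.filter (fun p => 1 ≤ p.2)).map (fun p => (max p.1 1, p.2))) m ↔ pvCov xs m := by
  constructor
  · rintro ⟨q, hq, c1, c2⟩
    obtain ⟨p, hp, rfl⟩ := List.mem_map.mp hq
    exact ⟨p, (List.mem_filter.mp hp).1, by simp at c1; omega, c2⟩
  · rintro ⟨p, hp, c1, c2⟩
    refine ⟨(max p.1 1, p.2), List.mem_map.mpr ⟨p, List.mem_filter.mpr ⟨hp, by simp; omega⟩, rfl⟩,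
      by simp; omega, c2⟩

theorem pvCov_perm {l l' : List (Int × Int)} (h : l.Perm l') (m : Int) :
    pvCov l m ↔ pvCov l' m := by
  constructor <;> rintro ⟨q, hq, hc⟩
  · exact ⟨q, h.mem_iff.mp hq, hc⟩
  · exact ⟨q, h.mem_iff.mpr hq, hc⟩

theorem pvA_good (xs : List (Int × Int)) : pvGood xs (min_positive_outside_py xs) := by
  have hperm := PySem.List.sorted2_perm
    ((xs.filter (fun p => 1 ≤ p.2)).map (fun p => (max p.1 1, p.2)))
    (fun p : Int × Int => p.1) (fun p : Int × Int => p.2) false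
  rcases hs : PySem.List.sorted2
      ((xs.filter (fun p => 1 ≤ p.2)).map (fun p => (max p.1 1, p.2)))
      (fun p : Int × Int => p.1) (fun p : Int × Int => p.2) with _ | ⟨x, rest⟩
  · -- positive is empty: every interval has hi < 1, so 1 is uncovered
    have hval : min_positive_outside_py xs = 1 := by
      simp only [min_positive_outside_py]; rw [hs]
    rw [hval]
    refine ⟨le_refl _, by intro m h1 h2; omega, ?_⟩
    intro hc
    rw [hs] at hperm
    have := (pvCov_perm hperm 1).mpr ((pvCov_pos_iff xs 1 (le_refl 1)).mpr hc)
    obtain ⟨q, hq, _⟩ := this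
    simp at hq
  · rw [hs] at hperm
    -- x is an element of the clamped positive list, hence 1 ≤ x.1 and 1 ≤ x.2
    have hx : 1 ≤ x.1 ∧ 1 ≤ x.2 := by
      have hxmem := hperm.mem_iff.mp List.mem_cons_self
      obtain ⟨p, hp, heq⟩ := List.mem_map.mp hxmem
      have := (List.mem_filter.mp hp).2
      simp at this
      constructor
      · rw [← heq]; simp
      · rw [← heq]; simpa using this
    have hpw : (x :: rest).Pairwise (fun a b : Int × Int => a.1 ≤ b.1) := by
      have := pvSorted2_pairwise_fst ((xs.filter (fun p => 1 ≤ p.2)).map (fun p => (max p.1 1, p.2)))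
      rwa [hs] at this
    obtain ⟨hpw_head, hpw_tail⟩ := List.pairwise_cons.mp hpw
    have key := pvMerge_inv rest x.1 x.2 [] [x] hpw_tail hpw_head
      (by intro m h1 h2
          simp only [List.getLastD_nil] at h1 h2
          exact ⟨x, List.mem_singleton.mpr rfl, h1, h2⟩)
      (by intro q hq _
          simp only [List.mem_singleton] at hq; subst hq
          simp)
      (by intro _ q hq
          simp only [List.mem_singleton] at hq; subst hq
          simp)
      (by intro hne; exact absurd rfl hne)
    simp only [List.getLastD_nil] at key
    obtain ⟨kF1, kF2, kcov, ksep⟩ := key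
    have hval : min_positive_outside_py xs =
        (if 1 < ((rest.foldl pvMergeStep [x]).getLastD (0, 0)).1 then 1
         else ((rest.foldl pvMergeStep [x]).getLastD (0, 0)).2 + 1) := by
      simp only [min_positive_outside_py]; rw [hs]
    -- [x] in the port vs [(x.1, x.2)] in the invariant: Prod eta
    rw [show ((x.1, x.2) : Int × Int) = x from rfl] at kF1 kF2 kcov ksep
    rw [hval]
    set F := (rest.foldl pvMergeStep [x]).getLastD (0, 0) with hF
    -- coverage transfer between xs and the sorted clamped list, for 1 ≤ m
    have htrans : ∀ m : Int, 1 ≤ m → (pvCov (x :: rest) m ↔ pvCov xs m) := by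
      intro m hm
      rw [pvCov_perm hperm m, pvCov_pos_iff xs m hm]
    by_cases hcase : 1 < F.1
    · rw [if_pos hcase]
      refine ⟨le_refl _, by intro m h1 h2; omega, ?_⟩
      intro hc
      obtain ⟨q, hq, c1, c2⟩ := (htrans 1 (le_refl 1)).mpr hc
      have hxq : x.1 ≤ q.1 := by
        rcases List.mem_cons.mp hq with rfl | hq'
        · exact le_refl _
        · exact hpw_head q hq'
      omega
    · rw [if_neg hcase]
      have hx1 : x.1 = 1 := by omega
      refine ⟨by omega, ?_, ?_⟩
      · intro m h1 h2
        exact (htrans m h1).mp (kcov m (by omega) (by omega))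
      · intro hc
        obtain ⟨q, hq, c1, c2⟩ := (htrans (F.2 + 1) (by omega)).mpr hc
        have := ksep q (by simpa using hq) c1
        omega

-- ===== VERDICT (by name: the statement is the Claim_ definition above) =====
theorem min_positive_outside_py_spec : Claim_equal_min_positive_outside_py := by
  intro xs _
  show min_positive_outside_py xs = min_positive_outside_py_alt xs
  exact pvGood_unique (pvA_good xs) (pvB_good xs)
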